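-- pv_equiv track=rewrite | github.com/SichangHe/CS304_group_project | speech/project5/hmm.py | _state_list_2_grouped_data
-- ===== SOURCE A (Python) =====
-- def _state_list_2_grouped_data(a):
--     prev = a[0]
--     r = [prev]
--     for id, i in enumerate(a):
--         if prev != i:
--             r.append(id)
--         prev = i
--     r.append(len(a))
--     return r
-- ===== SOURCE B (Python) =====
-- def _state_list_2_grouped_data(a):
--     first = a[0]
--     # split a into maximal runs of equal adjacent values (two-pointer scan),
--     # keeping only each run's length
--     runs = []
--     i, n = 0, len(a)
--     while i < n:
--         j = i
--         while j < n and a[j] == a[i]: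
--             j += 1
--         runs.append(j - i)
--         i = j
--     # prefix-sum the run lengths: each cumulative total is the index where the
--     # next run starts; the last total is len(a)
--     out = [first]
--     total = 0
--     for length in runs:
--         total += length
--         out.append(total)
--     return out
-- ===== Notes on version B (the rewrite author's own statement) =====
-- stated objective: alternative
-- what changed: B splits the list into maximal runs with a two-pointer scan and prefix-sums the run lengths to get the boundary indices, instead of A's enumerate loop comparing each element with the previous one and appending indices on change.
-- outside the precondition, e.g. on _state_list_2_grouped_data([]): A raises IndexError, B raises IndexError
import Mathlib
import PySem

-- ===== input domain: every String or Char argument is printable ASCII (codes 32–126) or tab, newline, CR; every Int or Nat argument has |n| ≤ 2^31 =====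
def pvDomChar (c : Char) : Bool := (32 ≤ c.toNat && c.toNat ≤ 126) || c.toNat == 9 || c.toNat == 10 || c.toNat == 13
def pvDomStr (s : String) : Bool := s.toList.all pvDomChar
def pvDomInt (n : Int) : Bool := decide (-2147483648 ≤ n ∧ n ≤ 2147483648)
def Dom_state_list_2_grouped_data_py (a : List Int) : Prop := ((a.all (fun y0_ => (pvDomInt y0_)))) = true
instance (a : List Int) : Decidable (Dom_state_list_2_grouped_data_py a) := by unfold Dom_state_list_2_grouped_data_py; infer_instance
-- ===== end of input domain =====

-- B replaces A's compare-with-previous enumerate loop by a run-length decomposition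
-- (two-pointer scan into maximal runs, then prefix sums of the run lengths); alternative, same cost.
-- Both versions raise IndexError on the empty list (a[0]); Pre_ excludes it.


-- ===== PORT A =====
def state_list_2_grouped_data_py (a : List Int) : List Int :=
  match PySem.List.pyGet? a 0 with
  | none => []   -- a[0]: IndexError on the empty list, excluded by Pre_
  | some prev0 =>
      let s := (PySem.List.enumerate a 0).foldl
        (fun (st : Int × List Int) (p : Int × Int) =>
          (p.2, if st.1 ≠ p.2 then st.2 ++ [p.1] else st.2))
        (prev0, [prev0])
      s.2 ++ [(a.length : Int)]

-- ===== PORT B =====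
-- inner while loop of Source B: count the leading elements equal to v, return (count, rest)
def pvCountRun (v : Int) : List Int → Nat × List Int
  | [] => (0, [])
  | x :: xs =>
      if x = v then
        let p := pvCountRun v xs
        (p.1 + 1, p.2)
      else (0, x :: xs)

theorem pvCountRun_len (v : Int) (xs : List Int) : (pvCountRun v xs).2.length ≤ xs.length := by
  induction xs with
  | nil => simp [pvCountRun]
  | cons x xs ih =>
      simp only [pvCountRun]
      split
      · simpa using Nat.le_succ_of_le ih
      · simp

-- outer while loop of Source B: the list of run lengths
def pvRuns : List Int → List Int
  | [] => []
  | x :: xs =>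
      let p := pvCountRun x xs
      ((p.1 : Int) + 1) :: pvRuns p.2
  termination_by l => l.length
  decreasing_by
    exact Nat.lt_succ_of_le (pvCountRun_len _ _)

def state_list_2_grouped_data_py_alt (a : List Int) : List Int :=
  match PySem.List.pyGet? a 0 with
  | none => []   -- first = a[0]: IndexError on the empty list, excluded by Pre_
  | some first =>
      let s := (pvRuns a).foldl
        (fun (st : Int × List Int) L => (st.1 + L, st.2 ++ [st.1 + L]))
        (0, [first])
      s.2

-- ===== PRECONDITION & SPEC =====
-- A raises IndexError on the empty list (a[0]); that is the only exclusion.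
def Pre_state_list_2_grouped_data_py (a : List Int) : Prop := a ≠ []
instance (a : List Int) : Decidable (Pre_state_list_2_grouped_data_py a) := by unfold Pre_state_list_2_grouped_data_py; infer_instance
def pvWitness_state_list_2_grouped_data_py : List Int := [1, 1, 2]

def Spec_state_list_2_grouped_data_py (a : List Int) (out : List Int) : Prop := out = state_list_2_grouped_data_py_alt a
instance (a : List Int) (out : List Int) : Decidable (Spec_state_list_2_grouped_data_py a out) := by unfold Spec_state_list_2_grouped_data_py; infer_instance

-- ===== CLAIM (what is proved, stated in full; the proofs are below) =====
def Claim_equal_state_list_2_grouped_data_py : Prop := ∀ (a : List Int), Dom_state_list_2_grouped_data_py a → Pre_state_list_2_grouped_data_py a → Spec_state_list_2_grouped_data_py a (state_list_2_grouped_data_py a)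

-- ===== LEMMAS AND PROOFS =====

-- the boundary indices A's loop appends, as a structural recursion
def pvBounds (prev k : Int) : List Int → List Int
  | [] => []
  | x :: xs => (if prev ≠ x then [k] else []) ++ pvBounds x (k + 1) xs

-- the prefix sums B's final loop appends
def pvPsum (t : Int) : List Int → List Int
  | [] => []
  | L :: rl => (t + L) :: pvPsum (t + L) rl

theorem pvA_fold (l : List Int) : ∀ (k prev : Int) (r : List Int),
    ((PySem.List.enumerate l k).foldl
      (fun (st : Int × List Int) (p : Int × Int) =>
        (p.2, if st.1 ≠ p.2 then st.2 ++ [p.1] else st.2)) (prev, r)).2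
    = r ++ pvBounds prev k l := by
  induction l with
  | nil => intro k prev r; simp [PySem.List.enumerate_nil, pvBounds]
  | cons x xs ih =>
      intro k prev r
      rw [PySem.List.enumerate_cons]
      simp only [List.foldl_cons, pvBounds]
      rw [ih]
      by_cases h : prev = x <;> simp [h]

theorem pvB_fold (rl : List Int) : ∀ (t : Int) (acc : List Int),
    (rl.foldl (fun (st : Int × List Int) L => (st.1 + L, st.2 ++ [st.1 + L])) (t, acc)).2
    = acc ++ pvPsum t rl := by
  induction rl with
  | nil => intro t acc; simp [pvPsum]
  | cons L rl ih => intro t acc; simp [pvPsum, ih]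

theorem pvCountRun_decomp (v : Int) (xs : List Int) :
    xs = List.replicate (pvCountRun v xs).1 v ++ (pvCountRun v xs).2 := by
  induction xs with
  | nil => simp [pvCountRun]
  | cons x xs ih =>
      simp only [pvCountRun]
      split
      · next h => simpa [List.replicate_succ, h] using ih
      · simp

theorem pvCountRun_head (v : Int) (xs : List Int) (y : Int) (ys : List Int)
    (h : (pvCountRun v xs).2 = y :: ys) : y ≠ v := by
  induction xs with
  | nil => simp [pvCountRun] at h
  | cons x xs ih =>
      simp only [pvCountRun] at h
      split at h
      · exact ih h
      · next hne => cases h; exact hne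

theorem pvBounds_replicate (c : Nat) : ∀ (v k : Int) (rest : List Int),
    pvBounds v k (List.replicate c v ++ rest) = pvBounds v (k + c) rest := by
  induction c with
  | zero => intro v k rest; simp
  | succ c ih =>
      intro v k rest
      simp only [List.replicate_succ, List.cons_append, pvBounds, ne_eq, not_true_eq_false,
        if_false, List.nil_append, ih]
      congr 1
      push_cast
      ring

theorem pvMain : ∀ (n : Nat) (xs : List Int), xs.length ≤ n → ∀ (x k : Int),
    pvBounds x (k + 1) xs ++ [k + 1 + (xs.length : Int)] = pvPsum k (pvRuns (x :: xs)) := by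
  intro n
  induction n with
  | zero =>
      intro xs hlen x k
      have : xs = [] := List.eq_nil_of_length_eq_zero (Nat.le_zero.mp hlen)
      subst this
      simp [pvBounds, pvRuns, pvCountRun, pvPsum]
  | succ n ih =>
      intro xs hlen x k
      obtain ⟨c, rest, hcr⟩ : ∃ c rest, pvCountRun x xs = (c, rest) := ⟨_, _, rfl⟩
      have hdecomp := pvCountRun_decomp x xs
      rw [hcr] at hdecomp
      have hruns : pvRuns (x :: xs) = ((c : Int) + 1) :: pvRuns rest := by
        rw [pvRuns, hcr]
      rw [hruns]
      have hb : pvBounds x (k + 1) xs = pvBounds x (k + 1 + c) rest := by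
        conv_lhs => rw [hdecomp]
        exact pvBounds_replicate c x (k + 1) rest
      have hlenxs : (xs.length : Int) = (c : Int) + (rest.length : Int) := by
        rw [hdecomp]; push_cast [List.length_append, List.length_replicate]; ring
      cases rest with
      | nil =>
          simp only [pvBounds, pvPsum, hb, List.nil_append, hlenxs]
          simp only [pvRuns, pvPsum, List.length_nil, Int.natCast_zero]
          congr 1
          ring
      | cons y ys =>
          have hy : y ≠ x := pvCountRun_head x xs y ys (by rw [hcr])
          have hlys : ys.length ≤ n := by
            have : xs.length = c + (ys.length + 1) := by
              rw [hdecomp]; simp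
            omega
          have hih := ih ys hlys y (k + (c : Int) + 1)
          rw [hb]
          have hxy : x ≠ y := fun h => hy h.symm
          rw [pvBounds, pvPsum]
          rw [if_pos (by simpa using hxy)]
          simp only [List.cons_append]
          congr 1
          · ring
          · have e0 : k + ((c : Int) + 1) = k + (c : Int) + 1 := by ring
            have e4 : k + 1 + (c : Int) + 1 = k + (c : Int) + 1 + 1 := by ring
            have e5 : k + 1 + (xs.length : Int) = k + (c : Int) + 1 + 1 + (ys.length : Int) := by
              rw [hlenxs]; push_cast [List.length_cons]; ring
            rw [e0, e4, e5]
            exact hih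

-- ===== VERDICT (by name: the statement is the Claim_ definition above) =====
theorem state_list_2_grouped_data_py_spec : Claim_equal_state_list_2_grouped_data_py := by
  intro a _hdom hpre
  unfold Spec_state_list_2_grouped_data_py
  cases a with
  | nil => exact absurd rfl hpre
  | cons x xs =>
      unfold state_list_2_grouped_data_py state_list_2_grouped_data_py_alt
      rw [PySem.List.pyGet?_zero_cons]
      simp only
      rw [pvA_fold, pvB_fold]
      have hmain := pvMain xs.length xs le_rfl x 0
      simp only [zero_add] at hmain
      simp only [pvBounds, ne_eq, not_true_eq_false, if_false, List.nil_append,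
        List.cons_append, List.append_assoc, List.singleton_append, zero_add]
      have h1 : (((x :: xs).length : Nat) : Int) = 1 + (xs.length : Int) := by
        push_cast [List.length_cons]; ring
      rw [h1, hmain]
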